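-- pv_equiv track=rewrite | github.com/Martial226/Martial226-checkpoint_structures_donnees | problème1.py | somme_elements_distincts
-- ===== SOURCE A (Python) =====
-- def somme_elements_distincts(ensemble1, ensemble2):
--     somme = 0
--     # Étape 1 : ajouter les éléments de ensemble1 qui ne sont pas dans ensemble2
--     for elem1 in ensemble1:
--         if elem1 not in ensemble2:
--             somme += elem1
--
--     # Étape 2 : ajouter les éléments de ensemble2 qui ne sont pas dans ensemble1
--     for elem2 in ensemble2:
--         if elem2 not in ensemble1:
--             somme += elem2
--
--     return somme
-- ===== SOURCE B (Python) =====
-- def somme_elements_distincts(ensemble1, ensemble2):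
--     set1 = set(ensemble1)
--     set2 = set(ensemble2)
--     total1 = sum(ensemble1)
--     total2 = sum(ensemble2)
--     overlap1 = sum(x for x in ensemble1 if x in set2)
--     overlap2 = sum(x for x in ensemble2 if x in set1)
--     return total1 + total2 - overlap1 - overlap2
-- ===== Notes on version B (the rewrite author's own statement) =====
-- stated objective: alternative
-- what changed: Replaces the two membership-filtered accumulation loops by full totals minus overlap sums, with set-based membership for the overlap tests.
import Mathlib
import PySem

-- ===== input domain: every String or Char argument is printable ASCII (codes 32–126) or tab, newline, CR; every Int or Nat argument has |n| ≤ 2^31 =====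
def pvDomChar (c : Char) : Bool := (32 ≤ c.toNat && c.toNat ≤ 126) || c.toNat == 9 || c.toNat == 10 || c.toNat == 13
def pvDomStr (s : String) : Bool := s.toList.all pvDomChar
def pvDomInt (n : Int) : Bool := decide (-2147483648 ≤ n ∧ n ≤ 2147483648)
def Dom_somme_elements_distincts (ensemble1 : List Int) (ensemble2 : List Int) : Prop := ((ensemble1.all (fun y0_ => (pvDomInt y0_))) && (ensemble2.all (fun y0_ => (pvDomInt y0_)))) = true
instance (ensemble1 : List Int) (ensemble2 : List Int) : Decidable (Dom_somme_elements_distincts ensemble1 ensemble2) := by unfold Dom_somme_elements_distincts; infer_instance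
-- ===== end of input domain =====

-- ===== PORT A =====
def somme_elements_distincts (ensemble1 : List Int) (ensemble2 : List Int) : Int :=
  let somme := ensemble1.foldl (fun s x => if ensemble2.contains x then s else s + x) 0
  ensemble2.foldl (fun s x => if ensemble1.contains x then s else s + x) somme

-- ===== PORT B =====
-- B: alternative decomposition — full totals minus overlap sums, set-based membership for the overlap tests.
def somme_elements_distincts_alt (ensemble1 : List Int) (ensemble2 : List Int) : Int :=
  let set1 : PySem.Set Int := PySem.Set.ofList ensemble1
  let set2 : PySem.Set Int := PySem.Set.ofList ensemble2
  let total1 := ensemble1.sum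
  let total2 := ensemble2.sum
  let overlap1 := (ensemble1.filter (fun x => PySem.Set.contains set2 x)).sum
  let overlap2 := (ensemble2.filter (fun x => PySem.Set.contains set1 x)).sum
  total1 + total2 - overlap1 - overlap2

-- ===== PRECONDITION & SPEC =====
def Spec_somme_elements_distincts (ensemble1 : List Int) (ensemble2 : List Int) (out : Int) : Prop := out = somme_elements_distincts_alt ensemble1 ensemble2
instance (ensemble1 : List Int) (ensemble2 : List Int) (out : Int) : Decidable (Spec_somme_elements_distincts ensemble1 ensemble2 out) := by unfold Spec_somme_elements_distincts; infer_instance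

-- ===== CLAIM (what is proved, stated in full; the proofs are below) =====
def Claim_equal_somme_elements_distincts : Prop := ∀ (ensemble1 : List Int) (ensemble2 : List Int), Dom_somme_elements_distincts ensemble1 ensemble2 → Spec_somme_elements_distincts ensemble1 ensemble2 (somme_elements_distincts ensemble1 ensemble2)

-- ===== LEMMAS AND PROOFS =====
theorem pv_foldl_sub (l m : List Int) (init : Int) :
    l.foldl (fun s x => if x ∈ m then s else s + x) init
      = init + l.sum - (l.filter (fun x => decide (x ∈ m))).sum := by
  induction l generalizing init with
  | nil => simp
  | cons a t ih =>
    simp only [List.foldl_cons, List.filter_cons, List.sum_cons]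
    by_cases h : a ∈ m
    · simp [h, ih]; ring
    · simp [h, ih]; ring

-- ===== VERDICT (by name: the statement is the Claim_ definition above) =====
theorem somme_elements_distincts_spec : Claim_equal_somme_elements_distincts := by
  intro e1 e2 _
  unfold Spec_somme_elements_distincts somme_elements_distincts somme_elements_distincts_alt
  simp [pv_foldl_sub]
  ring
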